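-- pv_equiv track=rewrite | github.com/pc5401/my_BOJ | 백준/Gold/1717. 집합의 표현/집합의 표현.py | solve
-- ===== SOURCE A (Python) =====
-- def find(node, union_find):
--     if union_find[node] != node:
--         union_find[node] = find(union_find[node], union_find)
--     return union_find[node]
--
-- def union(a, b, union_find):
--     root_a = find(a, union_find)
--     root_b = find(b, union_find)
--
--     if root_a != root_b:
--         union_find[root_a] = root_b
--
-- def solve(N: int, M: int, order_list: list[list[int]]) -> list[str]:
--     rtn = []
--     union_find = {i: i for i in range(N+1)}
--
--     for order, a, b in order_list:
--         if order == 1:  # 확인 연산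
--             if find(a, union_find) == find(b, union_find):
--                 rtn.append("YES")
--             else:
--                 rtn.append("NO")
--         else:  # 합집합 연산
--             union(a, b, union_find)
--
--     return rtn
-- ===== SOURCE B (Python) =====
-- def solve(N: int, M: int, order_list: list[list[int]]) -> list[str]:
--     # Flat colouring instead of a union-find forest: two nodes are connected
--     # exactly when they carry the same colour; a union repaints one colour.
--     colour = {i: i for i in range(N + 1)}
--     rtn = []
--     for order, a, b in order_list:
--         ca = colour[a]
--         cb = colour[b]
--         if order == 1:
--             rtn.append("YES" if ca == cb else "NO")
--         elif ca != cb: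
--             for x in range(N + 1):
--                 if colour[x] == ca:
--                     colour[x] = cb
--     return rtn
-- ===== Notes on version B (the rewrite author's own statement) =====
-- stated objective: simpler
-- what changed: Replaces the union-find forest (recursive find with path compression, root linking) by a flat colouring: each node holds a colour, a query compares the two colours, and a union repaints every node of one colour with the other, so no find/parent-chasing exists at all.
import Mathlib
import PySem

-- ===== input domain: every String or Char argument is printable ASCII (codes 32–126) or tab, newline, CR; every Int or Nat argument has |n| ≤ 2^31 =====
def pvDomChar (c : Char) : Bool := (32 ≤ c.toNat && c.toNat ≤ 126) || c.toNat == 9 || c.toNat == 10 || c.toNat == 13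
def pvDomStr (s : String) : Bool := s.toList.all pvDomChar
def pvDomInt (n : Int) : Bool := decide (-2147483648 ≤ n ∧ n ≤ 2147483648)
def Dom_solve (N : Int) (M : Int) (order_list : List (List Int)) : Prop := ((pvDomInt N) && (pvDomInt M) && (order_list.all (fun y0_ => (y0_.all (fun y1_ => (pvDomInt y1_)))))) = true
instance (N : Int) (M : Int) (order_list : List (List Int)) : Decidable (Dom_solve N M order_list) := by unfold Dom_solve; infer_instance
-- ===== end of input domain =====

-- B replaces A's union-find forest (recursive find with path compression, root linking)
-- by a flat colouring of the nodes: connected = same colour, union = repaint one colour.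
-- Both return the same YES/NO list because both encode the same connectivity relation.
-- A's port uses fuel (N+2) purely as a totality device for the recursive find; the proof
-- shows the fuel always suffices on inputs admitted by Pre_solve.

-- ===== PORT A =====
-- recursive find with path compression; returns (root, updated dict); none = missing key / fuel out
def findRec : Nat → Int → PySem.Dict Int Int → Option (Int × PySem.Dict Int Int)
  | 0, _, _ => none
  | f + 1, node, uf =>
    match uf.get? node with
    | none => none
    | some p =>
      if p ≠ node then
        match findRec f p uf with
        | none => none
        | some (r, uf') => some (r, uf'.insert node r)
      else some (node, uf)

def unionA (fuel : Nat) (a b : Int) (uf : PySem.Dict Int Int) : Option (PySem.Dict Int Int) :=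
  match findRec fuel a uf with
  | none => none
  | some (ra, uf1) =>
    match findRec fuel b uf1 with
    | none => none
    | some (rb, uf2) => some (if ra ≠ rb then uf2.insert ra rb else uf2)

def stepA (fuel : Nat) (st : Option (PySem.Dict Int Int × List String)) (o : List Int) :
    Option (PySem.Dict Int Int × List String) :=
  match st with
  | none => none
  | some (uf, rtn) =>
    match o with
    | [order, a, b] =>
      if order = 1 then
        match findRec fuel a uf with
        | none => none
        | some (ra, uf1) =>
          match findRec fuel b uf1 with
          | none => none
          | some (rb, uf2) => some (uf2, rtn ++ [if ra = rb then "YES" else "NO"])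
      else
        match unionA fuel a b uf with
        | none => none
        | some uf' => some (uf', rtn)
    | _ => none  -- unpacking 'order, a, b' fails: ValueError, excluded by Pre_solve

def solve (N : Int) (M : Int) (order_list : List (List Int)) : List String :=
  let fuel := (N + 2).toNat
  let uf0 := (PySem.List.pyRange 0 (N + 1) 1).foldl (fun d i => d.insert i i) PySem.Dict.empty
  match order_list.foldl (stepA fuel) (some (uf0, [])) with
  | some (_, rtn) => rtn
  | none => []

-- ===== PORT B =====
-- 'if colour[x] == ca: colour[x] = cb' for one x; the none branch is unreachable
-- (every x of range(N+1) is a key of colour throughout).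
def paintStep (ca cb : Int) (d : PySem.Dict Int Int) (x : Int) : PySem.Dict Int Int :=
  match d.get? x with
  | some c => if c = ca then d.insert x cb else d
  | none => d

-- 'for x in range(N+1): if colour[x] == ca: colour[x] = cb'
def repaint (N ca cb : Int) (col : PySem.Dict Int Int) : PySem.Dict Int Int :=
  (PySem.List.pyRange 0 (N + 1) 1).foldl (paintStep ca cb) col

def stepB (N : Int) (st : Option (PySem.Dict Int Int × List String)) (o : List Int) :
    Option (PySem.Dict Int Int × List String) :=
  match st with
  | none => none
  | some (col, rtn) =>
    match o with
    | [order, a, b] =>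
      match col.get? a, col.get? b with
      | some ca, some cb =>
        if order = 1 then some (col, rtn ++ [if ca = cb then "YES" else "NO"])
        else if ca ≠ cb then some (repaint N ca cb col, rtn)
        else some (col, rtn)
      | _, _ => none  -- KeyError, excluded by Pre_solve
    | _ => none  -- ValueError, excluded by Pre_solve

def solve_alt (N : Int) (M : Int) (order_list : List (List Int)) : List String :=
  let col0 := (PySem.List.pyRange 0 (N + 1) 1).foldl (fun d i => d.insert i i) PySem.Dict.empty
  match order_list.foldl (stepB N) (some (col0, [])) with
  | some (_, rtn) => rtn
  | none => []

-- ===== PRECONDITION & SPEC =====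
-- Pre_solve admits exactly the inputs where Python A returns normally: every order is a
-- triple [op, a, b] (else ValueError on unpacking) with a, b in 0..N (else KeyError).
def Pre_solve (N : Int) (M : Int) (order_list : List (List Int)) : Prop :=
  ∀ o ∈ order_list, o.length = 3 ∧ ∀ x ∈ o.drop 1, 0 ≤ x ∧ x ≤ N
instance (N : Int) (M : Int) (order_list : List (List Int)) : Decidable (Pre_solve N M order_list) := by unfold Pre_solve; infer_instance

def pvWitness_solve : Int × Int × List (List Int) := (2, 2, [[0, 1, 2], [1, 1, 2]])

def Spec_solve (N : Int) (M : Int) (order_list : List (List Int)) (out : List String) : Prop := out = solve_alt N M order_list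
instance (N : Int) (M : Int) (order_list : List (List Int)) (out : List String) : Decidable (Spec_solve N M order_list out) := by unfold Spec_solve; infer_instance

-- ===== CLAIM (what is proved, stated in full; the proofs are below) =====
def Claim_equal_solve : Prop := ∀ (N : Int) (M : Int) (order_list : List (List Int)), Dom_solve N M order_list → Pre_solve N M order_list → Spec_solve N M order_list (solve N M order_list)

-- ===== LEMMAS AND PROOFS =====

-- 'x reaches root r' in A's parent dict (the graph of the recursive find, no mutation)
inductive RootsTo (uf : PySem.Dict Int Int) : Int → Int → Prop
  | self (r : Int) : uf.get? r = some r → RootsTo uf r r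
  | step (x p r : Int) : uf.get? x = some p → p ≠ x → RootsTo uf p r → RootsTo uf x r

-- two parent dicts with the same reachability relation
def UfEquiv (uf uf' : PySem.Dict Int Int) : Prop := ∀ y s, RootsTo uf y s ↔ RootsTo uf' y s

def KeysIn (N : Int) (uf : PySem.Dict Int Int) : Prop :=
  ∀ x p, uf.get? x = some p → 0 ≤ x ∧ x ≤ N ∧ 0 ≤ p ∧ p ≤ N

def RootEq (uf : PySem.Dict Int Int) (x y : Int) : Prop :=
  ∃ r, RootsTo uf x r ∧ RootsTo uf y r

-- the coupling invariant between A's forest and B's colouring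
def CInv (N : Int) (uf col : PySem.Dict Int Int) : Prop :=
  KeysIn N uf ∧
  (∀ x, 0 ≤ x → x ≤ N → ∃ r, RootsTo uf x r) ∧
  (∀ x, 0 ≤ x → x ≤ N → ∃ c, col.get? x = some c) ∧
  (∀ x y, 0 ≤ x → x ≤ N → 0 ≤ y → y ≤ N → (RootEq uf x y ↔ col.get? x = col.get? y))

theorem rootsTo_root {uf : PySem.Dict Int Int} {x r : Int} (h : RootsTo uf x r) :
    uf.get? r = some r := by
  induction h with
  | self r hr => exact hr
  | step x p r _ _ _ ih => exact ih

theorem rootsTo_det {uf : PySem.Dict Int Int} {x r r' : Int}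
    (h1 : RootsTo uf x r) (h2 : RootsTo uf x r') : r = r' := by
  induction h1 generalizing r' with
  | self a ha =>
    cases h2 with
    | self => rfl
    | step _ p _ hp hne _ => rw [ha] at hp; cases hp; exact absurd rfl hne
  | step x p r hx hne _ ih =>
    cases h2 with
    | self _ hx' => rw [hx'] at hx; cases hx; exact absurd rfl hne
    | step _ q _ hq _ hrec => rw [hx] at hq; cases hq; exact ih hrec

theorem rootEq_iff_roots {uf : PySem.Dict Int Int} {x y sx sy : Int}
    (hx : RootsTo uf x sx) (hy : RootsTo uf y sy) : RootEq uf x y ↔ sx = sy := by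
  constructor
  · rintro ⟨r, h1, h2⟩
    rw [rootsTo_det hx h1, rootsTo_det hy h2]
  · rintro rfl; exact ⟨sx, hx, hy⟩

-- path compression: re-pointing x straight at its root changes no reachability
theorem ufEquiv_insert_root {uf : PySem.Dict Int Int} {x r : Int}
    (hxr : RootsTo uf x r) (hne : r ≠ x) : UfEquiv uf (uf.insert x r) := by
  obtain ⟨p, hx, hpx⟩ : ∃ p, uf.get? x = some p ∧ p ≠ x := by
    cases hxr with
    | self => exact absurd rfl hne
    | step _ p _ hp hpne _ => exact ⟨p, hp, hpne⟩
  have hr : uf.get? r = some r := rootsTo_root hxr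
  intro y s
  constructor
  · intro h
    induction h with
    | self a ha =>
      have hax : a ≠ x := by rintro rfl; rw [ha] at hx; cases hx; exact absurd rfl hpx
      exact RootsTo.self a (by rw [PySem.Dict.get?_insert, if_neg hax]; exact ha)
    | step a q s ha hqa hrec ih =>
      by_cases hax : a = x
      · subst hax
        have hs : s = r := rootsTo_det (RootsTo.step a q s ha hqa hrec) hxr
        rw [hs]
        refine RootsTo.step a r r ?_ hne (RootsTo.self r ?_)
        · rw [PySem.Dict.get?_insert, if_pos rfl]
        · rw [PySem.Dict.get?_insert, if_neg hne]; exact hr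
      · exact RootsTo.step a q s (by rw [PySem.Dict.get?_insert, if_neg hax]; exact ha) hqa ih
  · intro h
    induction h with
    | self a ha =>
      rw [PySem.Dict.get?_insert] at ha
      by_cases hax : a = x
      · rw [if_pos hax] at ha; cases ha; exact absurd hax hne
      · rw [if_neg hax] at ha; exact RootsTo.self a ha
    | step a q s ha hqa hrec ih =>
      rw [PySem.Dict.get?_insert] at ha
      by_cases hax : a = x
      · rw [if_pos hax] at ha; cases ha; subst hax
        have : s = r := rootsTo_det ih (RootsTo.self _ hr)
        rw [this]; exact hxr
      · rw [if_neg hax] at ha; exact RootsTo.step a q s ha hqa ih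

-- linking root ra under root rb: every root s becomes (if s = ra then rb else s)
theorem rootsTo_link {uf : PySem.Dict Int Int} {ra rb : Int}
    (hra : uf.get? ra = some ra) (hrb : uf.get? rb = some rb) (hab : ra ≠ rb)
    {y s : Int} (h : RootsTo uf y s) :
    RootsTo (uf.insert ra rb) y (if s = ra then rb else s) := by
  induction h with
  | self a ha =>
    by_cases hax : a = ra
    · subst hax; rw [if_pos rfl]
      refine RootsTo.step a rb rb ?_ (Ne.symm hab) (RootsTo.self rb ?_)
      · rw [PySem.Dict.get?_insert, if_pos rfl]
      · rw [PySem.Dict.get?_insert, if_neg (Ne.symm hab)]; exact hrb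
    · rw [if_neg hax]
      exact RootsTo.self a (by rw [PySem.Dict.get?_insert, if_neg hax]; exact ha)
  | step a q s ha hqa hrec ih =>
    have hax : a ≠ ra := by rintro rfl; rw [ha] at hra; cases hra; exact absurd rfl hqa
    exact RootsTo.step a q _ (by rw [PySem.Dict.get?_insert, if_neg hax]; exact ha) hqa ih

-- explicit parent chains, to bound the recursion depth of A's find
inductive Chain (uf : PySem.Dict Int Int) : Int → List Int → Int → Prop
  | nil (r : Int) : uf.get? r = some r → Chain uf r [] r
  | cons (x p r : Int) (l : List Int) :
      uf.get? x = some p → p ≠ x → Chain uf p l r → Chain uf x (x :: l) r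

theorem chain_of_rootsTo {uf : PySem.Dict Int Int} {x r : Int} (h : RootsTo uf x r) :
    ∃ l, Chain uf x l r := by
  induction h with
  | self a ha => exact ⟨[], Chain.nil a ha⟩
  | step a q s ha hqa _ ih => obtain ⟨l, hl⟩ := ih; exact ⟨a :: l, Chain.cons a q s l ha hqa hl⟩

theorem chain_rootsTo {uf : PySem.Dict Int Int} {x r : Int} {l : List Int}
    (h : Chain uf x l r) : RootsTo uf x r := by
  induction h with
  | nil r hr => exact RootsTo.self r hr
  | cons x p r l hx hpx _ ih => exact RootsTo.step x p r hx hpx ih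

theorem chain_det {uf : PySem.Dict Int Int} {x r r' : Int} {l l' : List Int}
    (h1 : Chain uf x l r) (h2 : Chain uf x l' r') : l = l' ∧ r = r' := by
  induction h1 generalizing l' r' with
  | nil a ha =>
    cases h2 with
    | nil => exact ⟨rfl, rfl⟩
    | cons _ p _ _ hp hne _ => rw [ha] at hp; cases hp; exact absurd rfl hne
  | cons x p r l hx hne _ ih =>
    cases h2 with
    | nil _ hx' => rw [hx'] at hx; cases hx; exact absurd rfl hne
    | cons _ q _ l2 hq _ hrec =>
      rw [hx] at hq; cases hq
      obtain ⟨h1, h2⟩ := ih hrec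
      exact ⟨by rw [h1], h2⟩

theorem chain_mem {uf : PySem.Dict Int Int} {p r y : Int} {l : List Int}
    (h : Chain uf p l r) (hy : y ∈ l) : ∃ ly, Chain uf y ly r ∧ ly.length ≤ l.length := by
  induction h with
  | nil => cases hy
  | cons x q s l hx hqx hch ih =>
    rcases List.mem_cons.1 hy with rfl | hy'
    · exact ⟨y :: l, Chain.cons y q s l hx hqx hch, le_refl _⟩
    · obtain ⟨ly, h1, h2⟩ := ih hy'
      exact ⟨ly, h1, Nat.le_succ_of_le h2⟩

theorem chain_nodup {uf : PySem.Dict Int Int} {x r : Int} {l : List Int}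
    (h : Chain uf x l r) : l.Nodup := by
  induction h with
  | nil => exact List.nodup_nil
  | cons x p r l hx hpx hch ih =>
    refine List.nodup_cons.2 ⟨fun hmem => ?_, ih⟩
    obtain ⟨lx, hlx, hlen⟩ := chain_mem hch hmem
    obtain ⟨heq, _⟩ := chain_det hlx (Chain.cons x p r l hx hpx hch)
    rw [heq] at hlen; simp at hlen

theorem chain_mem_range {N : Int} {uf : PySem.Dict Int Int} (hK : KeysIn N uf)
    {x r : Int} {l : List Int} (h : Chain uf x l r) :
    ∀ y ∈ l, 0 ≤ y ∧ y ≤ N := by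
  induction h with
  | nil => intro y hy; cases hy
  | cons x p r l hx _ _ ih =>
    intro y hy
    rcases List.mem_cons.1 hy with rfl | hy'
    · obtain ⟨h1, h2, _, _⟩ := hK _ _ hx; exact ⟨h1, h2⟩
    · exact ih y hy'

theorem chain_length_le {N : Int} {uf : PySem.Dict Int Int} (hK : KeysIn N uf)
    {x r : Int} {l : List Int} (h : Chain uf x l r) : l.length ≤ (N + 1).toNat := by
  have hsub : l ⊆ PySem.List.pyRange 0 (N + 1) 1 := by
    intro y hy
    obtain ⟨h1, h2⟩ := chain_mem_range hK h y hy
    exact (PySem.List.mem_pyRange_one).2 ⟨h1, by omega⟩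
  have := (List.subperm_of_subset (chain_nodup h) hsub).length_le
  rwa [PySem.List.length_pyRange_one, sub_zero] at this

theorem keysIn_insert {N : Int} {uf : PySem.Dict Int Int} (hK : KeysIn N uf)
    {x r : Int} (hx : 0 ≤ x ∧ x ≤ N) (hr : 0 ≤ r ∧ r ≤ N) : KeysIn N (uf.insert x r) := by
  intro y q hy
  rw [PySem.Dict.get?_insert] at hy
  by_cases hyx : y = x
  · rw [if_pos hyx] at hy; cases hy; exact ⟨hyx ▸ hx.1, hyx ▸ hx.2, hr.1, hr.2⟩
  · rw [if_neg hyx] at hy; exact hK _ _ hy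

-- A's find succeeds with the given chain length as fuel bound, returns the root,
-- preserves reachability and key bounds
theorem findRec_chain {N : Int} : ∀ (l : List Int) (f : Nat) (uf : PySem.Dict Int Int) (x r : Int),
    KeysIn N uf → Chain uf x l r → l.length < f →
    ∃ uf', findRec f x uf = some (r, uf') ∧ UfEquiv uf uf' ∧ KeysIn N uf' := by
  intro l
  induction l with
  | nil =>
    intro f uf x r hK hch hf
    obtain ⟨f', rfl⟩ : ∃ f', f = f' + 1 := ⟨f - 1, by omega⟩
    cases hch with
    | nil _ hr =>
      refine ⟨uf, ?_, fun y s => Iff.rfl, hK⟩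
      simp [findRec, hr]
  | cons x0 l ih =>
    intro f uf x r hK hch hf
    obtain ⟨f', rfl⟩ : ∃ f', f = f' + 1 := ⟨f - 1, by omega⟩
    cases hch with
    | cons _ p _ _ hx hpx hchp =>
      obtain ⟨d, hfind, hequiv, hKd⟩ := ih f' uf p r hK hchp (by simp at hf; omega)
      have hroot : uf.get? r = some r := rootsTo_root (chain_rootsTo hchp)
      have hxr : x0 ≠ r := by rintro rfl; rw [hroot] at hx; cases hx; exact absurd rfl hpx
      have hxtoR : RootsTo uf x0 r := RootsTo.step x0 p r hx hpx (chain_rootsTo hchp)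
      have hdxr : RootsTo d x0 r := (hequiv x0 r).1 hxtoR
      have hcomp : UfEquiv d (d.insert x0 r) := ufEquiv_insert_root hdxr (Ne.symm hxr)
      refine ⟨d.insert x0 r, ?_, ?_, ?_⟩
      · simp only [findRec, hx, if_pos hpx, hfind]
      · intro y s; exact (hequiv y s).trans (hcomp y s)
      · obtain ⟨hx1, hx2, _, _⟩ := hK _ _ hx
        obtain ⟨hr1, hr2, _, _⟩ := hK _ _ hroot
        exact keysIn_insert hKd ⟨hx1, hx2⟩ ⟨hr1, hr2⟩

theorem findRec_ok {N : Int} {uf : PySem.Dict Int Int} {a r : Int}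
    (hK : KeysIn N uf) (h : RootsTo uf a r) (ha0 : 0 ≤ a) (haN : a ≤ N) :
    ∃ uf', findRec (N + 2).toNat a uf = some (r, uf') ∧ UfEquiv uf uf' ∧ KeysIn N uf' := by
  obtain ⟨l, hl⟩ := chain_of_rootsTo h
  refine findRec_chain l (N + 2).toNat uf a r hK hl ?_
  have := chain_length_le hK hl
  omega

theorem cinv_transfer {N : Int} {uf uf' col : PySem.Dict Int Int}
    (hI : CInv N uf col) (he : UfEquiv uf uf') (hK : KeysIn N uf') : CInv N uf' col := by
  obtain ⟨_, hTot, hCol, hRel⟩ := hI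
  refine ⟨hK, fun x h1 h2 => ?_, hCol, fun x y h1 h2 h3 h4 => ?_⟩
  · obtain ⟨r, hr⟩ := hTot x h1 h2; exact ⟨r, (he x r).1 hr⟩
  · rw [← hRel x y h1 h2 h3 h4]
    constructor
    · rintro ⟨r, hx, hy⟩; exact ⟨r, (he x r).2 hx, (he y r).2 hy⟩
    · rintro ⟨r, hx, hy⟩; exact ⟨r, (he x r).1 hx, (he y r).1 hy⟩

-- one pass of B's repaint loop, pointwise
theorem repaint_get (ca cb : Int) : ∀ (L : List Int), L.Nodup → ∀ (d : PySem.Dict Int Int) (y : Int),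
    (L.foldl (paintStep ca cb) d).get? y =
      if y ∈ L then
        (match d.get? y with
         | some c => if c = ca then some cb else some c
         | none => none)
      else d.get? y := by
  intro L
  induction L with
  | nil => intro _ d y; simp
  | cons x L ih =>
    intro hnd d y
    obtain ⟨hxL, hL⟩ := List.nodup_cons.1 hnd
    have hstep_ne : ∀ (z : Int), z ≠ x → (paintStep ca cb d x).get? z = d.get? z := by
      intro z hz
      cases hgx : d.get? x with
      | none => simp [paintStep, hgx]
      | some c =>
        by_cases hc : c = ca
        · simp [paintStep, hgx, hc, PySem.Dict.get?_insert, hz]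
        · simp [paintStep, hgx, hc]
    rw [List.foldl_cons, ih hL]
    by_cases hyL : y ∈ L
    · rw [if_pos hyL, if_pos (List.mem_cons_of_mem x hyL)]
      rw [hstep_ne y (fun h => hxL (h ▸ hyL))]
    · rw [if_neg hyL]
      by_cases hyx : y = x
      · subst hyx
        rw [if_pos (List.mem_cons_self)]
        cases hgy : d.get? y with
        | none => simp [paintStep, hgy]
        | some c =>
          by_cases hc : c = ca
          · simp [paintStep, hgy, hc, PySem.Dict.get?_insert_self]
          · simp [paintStep, hgy, hc]
      · rw [if_neg (by simp [hyx, hyL]), hstep_ne y hyx]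

-- the YES/NO branch and the repaint branch of one instruction, coupled
theorem step_sim {N : Int} {uf col : PySem.Dict Int Int} (hI : CInv N uf col)
    (order a b : Int) (ha0 : 0 ≤ a) (haN : a ≤ N) (hb0 : 0 ≤ b) (hbN : b ≤ N)
    (rtn : List String) :
    ∃ uf' col' rtn',
      stepA (N + 2).toNat (some (uf, rtn)) [order, a, b] = some (uf', rtn') ∧
      stepB N (some (col, rtn)) [order, a, b] = some (col', rtn') ∧ CInv N uf' col' := by
  obtain ⟨hK, hTot, hCol, hRel⟩ := hI
  obtain ⟨ra, hra⟩ := hTot a ha0 haN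
  obtain ⟨rb, hrb⟩ := hTot b hb0 hbN
  obtain ⟨uf1, hfa, he1, hK1⟩ := findRec_ok hK hra ha0 haN
  have hrb1 : RootsTo uf1 b rb := (he1 b rb).1 hrb
  obtain ⟨uf2, hfb, he2, hK2⟩ := findRec_ok hK1 hrb1 hb0 hbN
  have he12 : UfEquiv uf uf2 := fun y s => (he1 y s).trans (he2 y s)
  have hI2 : CInv N uf2 col := cinv_transfer ⟨hK, hTot, hCol, hRel⟩ he12 hK2
  obtain ⟨ca, hca⟩ := hCol a ha0 haN
  obtain ⟨cb, hcb⟩ := hCol b hb0 hbN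
  -- the bridge: equal roots iff equal colours
  have hbridge : (ra = rb) ↔ (ca = cb) := by
    rw [← rootEq_iff_roots hra hrb, hRel a b ha0 haN hb0 hbN, hca, hcb]
    exact ⟨fun h => by injection h, fun h => by rw [h]⟩
  by_cases hord : order = 1
  · -- query
    refine ⟨uf2, col, rtn ++ [if ra = rb then "YES" else "NO"], ?_, ?_, hI2⟩
    · simp only [stepA, if_pos hord, hfa, hfb]
    · simp only [stepB, hca, hcb, if_pos hord]
      by_cases h : ra = rb
      · rw [if_pos h, if_pos (hbridge.1 h)]
      · rw [if_neg h, if_neg (fun hc => h (hbridge.2 hc))]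
  · -- union
    by_cases heq : ra = rb
    · -- same component: both sides leave the state (up to compression)
      refine ⟨uf2, col, rtn, ?_, ?_, hI2⟩
      · simp only [stepA, if_neg hord, unionA, hfa, hfb, ne_eq, if_neg (not_not.2 heq)]
      · simp only [stepB, hca, hcb, if_neg hord, ne_eq,
          if_neg (not_not.2 (hbridge.1 heq))]
    · -- different components: A links ra under rb, B repaints colour ca to cb
      have hcane : ¬ ca = cb := fun hc => heq (hbridge.2 hc)
      refine ⟨uf2.insert ra rb, repaint N ca cb col, rtn, ?_, ?_, ?_⟩
      · simp only [stepA, if_neg hord, unionA, hfa, hfb, ne_eq, if_pos heq]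
      · simp only [stepB, hca, hcb, if_neg hord, ne_eq, if_pos hcane]
      · -- re-establish the invariant
        obtain ⟨_, hTot2, _, hRel2⟩ := hI2
        have hra2 : RootsTo uf2 a ra := (he12 a ra).1 hra
        have hrb2 : RootsTo uf2 b rb := (he12 b rb).1 hrb
        have hgra : uf2.get? ra = some ra := rootsTo_root hra2
        have hgrb : uf2.get? rb = some rb := rootsTo_root hrb2
        obtain ⟨hra0, hraN, _, _⟩ := hK2 _ _ hgra
        obtain ⟨hrb0, hrbN, _, _⟩ := hK2 _ _ hgrb
        have hlink := fun {y s} (h : RootsTo uf2 y s) => rootsTo_link hgra hgrb heq h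
        have hcol' : ∀ y c, 0 ≤ y → y ≤ N → col.get? y = some c →
            (repaint N ca cb col).get? y = some (if c = ca then cb else c) := by
          intro y c hy0 hyN hgy
          unfold repaint
          rw [repaint_get ca cb _ (PySem.List.nodup_pyRange_one 0 (N + 1)) col y,
            if_pos ((PySem.List.mem_pyRange_one).2 ⟨hy0, by omega⟩), hgy]
          show (if c = ca then some cb else some c) = some (if c = ca then cb else c)
          by_cases hc : c = ca
          · rw [if_pos hc, if_pos hc]
          · rw [if_neg hc, if_neg hc]
        refine ⟨keysIn_insert hK2 ⟨hra0, hraN⟩ ⟨hrb0, hrbN⟩, ?_, ?_, ?_⟩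
        · intro x h1 h2
          obtain ⟨s, hs⟩ := hTot2 x h1 h2
          exact ⟨_, hlink hs⟩
        · intro x h1 h2
          obtain ⟨c, hc⟩ := hCol x h1 h2
          exact ⟨_, hcol' x c h1 h2 hc⟩
        · intro x y h1 h2 h3 h4
          obtain ⟨sx, hsx⟩ := hTot2 x h1 h2
          obtain ⟨sy, hsy⟩ := hTot2 y h3 h4
          obtain ⟨cx, hcx⟩ := hCol x h1 h2
          obtain ⟨cy, hcy⟩ := hCol y h3 h4
          -- pointwise bridges between roots and colours in the pre-state
          have bxa : (sx = ra) ↔ (cx = ca) := by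
            rw [← rootEq_iff_roots hsx hra2, hRel2 x a h1 h2 ha0 haN, hcx, hca]
            exact ⟨fun h => by injection h, fun h => by rw [h]⟩
          have bya : (sy = ra) ↔ (cy = ca) := by
            rw [← rootEq_iff_roots hsy hra2, hRel2 y a h3 h4 ha0 haN, hcy, hca]
            exact ⟨fun h => by injection h, fun h => by rw [h]⟩
          have bxb : (sx = rb) ↔ (cx = cb) := by
            rw [← rootEq_iff_roots hsx hrb2, hRel2 x b h1 h2 hb0 hbN, hcx, hcb]
            exact ⟨fun h => by injection h, fun h => by rw [h]⟩
          have byb : (sy = rb) ↔ (cy = cb) := by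
            rw [← rootEq_iff_roots hsy hrb2, hRel2 y b h3 h4 hb0 hbN, hcy, hcb]
            exact ⟨fun h => by injection h, fun h => by rw [h]⟩
          have bxy : (sx = sy) ↔ (cx = cy) := by
            rw [← rootEq_iff_roots hsx hsy, hRel2 x y h1 h2 h3 h4, hcx, hcy]
            exact ⟨fun h => by injection h, fun h => by rw [h]⟩
          rw [rootEq_iff_roots (hlink hsx) (hlink hsy),
            hcol' x cx h1 h2 hcx, hcol' y cy h3 h4 hcy]
          constructor
          · intro h
            by_cases hx' : sx = ra <;> by_cases hy' : sy = ra
            · rw [if_pos (bxa.1 hx'), if_pos (bya.1 hy')]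
            · rw [if_pos hx', if_neg hy'] at h
              rw [if_pos (bxa.1 hx'), if_neg (fun hc => hy' (bya.2 hc))]
              exact congrArg some (byb.1 h.symm).symm
            · rw [if_neg hx', if_pos hy'] at h
              rw [if_neg (fun hc => hx' (bxa.2 hc)), if_pos (bya.1 hy')]
              exact congrArg some (bxb.1 h)
            · rw [if_neg hx', if_neg hy'] at h
              rw [if_neg (fun hc => hx' (bxa.2 hc)), if_neg (fun hc => hy' (bya.2 hc))]
              exact congrArg some (bxy.1 h)
          · intro h
            have h' : (if cx = ca then cb else cx) = (if cy = ca then cb else cy) := by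
              injection h
            by_cases hx' : cx = ca <;> by_cases hy' : cy = ca
            · rw [if_pos (bxa.2 hx'), if_pos (bya.2 hy')]
            · rw [if_pos hx', if_neg hy'] at h'
              rw [if_pos (bxa.2 hx'), if_neg (fun hs => hy' (bya.1 hs))]
              exact (byb.2 h'.symm).symm
            · rw [if_neg hx', if_pos hy'] at h'
              rw [if_neg (fun hs => hx' (bxa.1 hs)), if_pos (bya.2 hy')]
              exact bxb.2 h'
            · rw [if_neg hx', if_neg hy'] at h'
              rw [if_neg (fun hs => hx' (bxa.1 hs)), if_neg (fun hs => hy' (bya.1 hs))]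
              exact bxy.2 h'

-- the whole instruction list, coupled
theorem run_eq {N : Int} : ∀ (L : List (List Int)) (uf col : PySem.Dict Int Int) (rtn : List String),
    CInv N uf col → (∀ o ∈ L, o.length = 3 ∧ ∀ x ∈ o.drop 1, 0 ≤ x ∧ x ≤ N) →
    ∃ uf' col' rtn',
      L.foldl (stepA (N + 2).toNat) (some (uf, rtn)) = some (uf', rtn') ∧
      L.foldl (stepB N) (some (col, rtn)) = some (col', rtn') ∧ CInv N uf' col' := by
  intro L
  induction L with
  | nil => intro uf col rtn hI _; exact ⟨uf, col, rtn, rfl, rfl, hI⟩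
  | cons o L ih =>
    intro uf col rtn hI hPre
    obtain ⟨hlen, hrange⟩ := hPre o (List.mem_cons_self)
    obtain ⟨order, a, b, rfl⟩ : ∃ t a b, o = [t, a, b] := by
      match o, hlen with
      | [t, a, b], _ => exact ⟨t, a, b, rfl⟩
    have ha := hrange a (by simp)
    have hb := hrange b (by simp)
    obtain ⟨uf', col', rtn', h1, h2, hI'⟩ :=
      step_sim hI order a b ha.1 ha.2 hb.1 hb.2 rtn
    rw [List.foldl_cons, List.foldl_cons, h1, h2]
    exact ih uf' col' rtn' hI' (fun o ho => hPre o (List.mem_cons_of_mem _ ho))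

-- the initial dict {i: i for i in range(N+1)}, pointwise
theorem init_get : ∀ (L : List Int) (d : PySem.Dict Int Int) (y : Int),
    (L.foldl (fun d i => d.insert i i) d).get? y = if y ∈ L then some y else d.get? y := by
  intro L
  induction L with
  | nil => intro d y; simp
  | cons i L ih =>
    intro d y
    rw [List.foldl_cons, ih]
    by_cases hyL : y ∈ L
    · rw [if_pos hyL, if_pos (List.mem_cons_of_mem i hyL)]
    · rw [if_neg hyL]
      by_cases hyi : y = i
      · subst hyi
        rw [if_pos (List.mem_cons_self), PySem.Dict.get?_insert_self]
      · rw [if_neg (by simp [hyi, hyL]), PySem.Dict.get?_insert, if_neg hyi]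

theorem cinv_init (N : Int) :
    CInv N ((PySem.List.pyRange 0 (N + 1) 1).foldl (fun d i => d.insert i i) PySem.Dict.empty)
          ((PySem.List.pyRange 0 (N + 1) 1).foldl (fun d i => d.insert i i) PySem.Dict.empty) := by
  set d0 := (PySem.List.pyRange 0 (N + 1) 1).foldl (fun d i => d.insert i i) PySem.Dict.empty with hd0
  have hget : ∀ y, d0.get? y = if 0 ≤ y ∧ y ≤ N then some y else none := by
    intro y
    rw [hd0, init_get]
    by_cases hy : 0 ≤ y ∧ y ≤ N
    · rw [if_pos ((PySem.List.mem_pyRange_one).2 ⟨hy.1, by omega⟩), if_pos hy]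
    · rw [if_neg (fun hm => hy (by
        obtain ⟨h1, h2⟩ := (PySem.List.mem_pyRange_one).1 hm; exact ⟨h1, by omega⟩)),
        if_neg hy, PySem.Dict.get?_empty]
  have hroot : ∀ x r, RootsTo d0 x r → r = x := by
    intro x r h
    cases h with
    | self => rfl
    | step _ p _ hp hne _ =>
      rw [hget] at hp
      by_cases hx : 0 ≤ x ∧ x ≤ N
      · rw [if_pos hx] at hp; cases hp; exact absurd rfl hne
      · rw [if_neg hx] at hp; cases hp
  refine ⟨?_, ?_, ?_, ?_⟩
  · intro x p h
    rw [hget] at h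
    by_cases hx : 0 ≤ x ∧ x ≤ N
    · rw [if_pos hx] at h; cases h; exact ⟨hx.1, hx.2, hx.1, hx.2⟩
    · rw [if_neg hx] at h; cases h
  · intro x h1 h2
    exact ⟨x, RootsTo.self x (by rw [hget, if_pos ⟨h1, h2⟩])⟩
  · intro x h1 h2; exact ⟨x, by rw [hget, if_pos ⟨h1, h2⟩]⟩
  · intro x y h1 h2 h3 h4
    rw [hget, hget, if_pos ⟨h1, h2⟩, if_pos ⟨h3, h4⟩]
    constructor
    · rintro ⟨r, hx, hy⟩
      rw [← hroot x r hx, ← hroot y r hy]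
    · intro h; injection h with h
      subst h
      exact ⟨x, RootsTo.self x (by rw [hget, if_pos ⟨h1, h2⟩]),
             RootsTo.self x (by rw [hget, if_pos ⟨h1, h2⟩])⟩

-- ===== VERDICT (by name: the statement is the Claim_ definition above) =====
theorem solve_spec : Claim_equal_solve := by
  intro N M order_list _ hPre
  unfold Spec_solve solve solve_alt
  obtain ⟨uf', col', rtn', h1, h2, _⟩ :=
    run_eq order_list _ _ [] (cinv_init N) hPre
  simp only [h1, h2]
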